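-- pv_equiv track=rewrite | github.com/labsyspharm/minerva-lib-python | src/minerva_lib/autosettings.py | _local_minimas
-- ===== SOURCE A (Python) =====
-- def _local_minimas(arr, window=5):
--     minimas = []
--     for i in range(len(arr)-window):
--         is_minima = True
--         for l in range(i, i+window//2):
--             if arr[l] <= arr[l+1]:
--                 is_minima = False
--
--         for r in range(i+1+(window//2), i+window):
--             if arr[r] <= arr[r-1]:
--                 is_minima = False
--
--         if is_minima:
--             minimas.append(i)
--
--     return minimas
-- ===== SOURCE B (Python) =====
-- def _local_minimas(arr, window=5):
--     n = len(arr)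
--     h = window // 2
--     k = window - 1 - h
--     # run lengths of strict decrease / increase steps, computed right-to-left
--     down = [0]
--     up = [0]
--     for j in range(n - 2, -1, -1):
--         down.append(down[-1] + 1 if arr[j] > arr[j + 1] else 0)
--         up.append(up[-1] + 1 if arr[j] < arr[j + 1] else 0)
--     down.reverse()
--     up.reverse()
--     return [i for i in range(n - window)
--             if (h <= 0 or down[i] >= h) and (k <= 0 or up[i + h] >= k)]
-- ===== Notes on version B (the rewrite author's own statement) =====
-- stated objective: faster
-- what changed: B precomputes run lengths of strict decrease/increase steps in one right-to-left pass and replaces A's per-index window rescans by two O(1) run-length comparisons.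
import Mathlib
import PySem

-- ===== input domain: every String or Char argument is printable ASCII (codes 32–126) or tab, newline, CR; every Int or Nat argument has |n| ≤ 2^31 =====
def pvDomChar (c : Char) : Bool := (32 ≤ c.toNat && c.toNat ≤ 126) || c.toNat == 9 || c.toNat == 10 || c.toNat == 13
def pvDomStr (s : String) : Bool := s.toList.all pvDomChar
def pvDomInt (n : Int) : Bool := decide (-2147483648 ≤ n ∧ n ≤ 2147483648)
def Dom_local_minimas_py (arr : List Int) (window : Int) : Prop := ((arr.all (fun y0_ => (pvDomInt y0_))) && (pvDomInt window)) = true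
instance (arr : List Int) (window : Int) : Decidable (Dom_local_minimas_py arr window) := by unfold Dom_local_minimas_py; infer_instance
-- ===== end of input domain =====

-- B replaces A's O(n·window) per-index rescans by run lengths of strict decrease/increase
-- steps precomputed in one right-to-left pass, giving an O(1) check per index (objective: faster).

-- ===== PORT A =====
-- All arr[...] indexings in A are in range whenever the loops execute, so pyGetD is exact here.
def local_minimas_py (arr : List Int) (window : Int) : List Int :=
  (PySem.List.pyRange 0 ((arr.length : Int) - window) 1).foldl (fun minimas i =>
    let m1 := (PySem.List.pyRange i (i + PySem.Int.floordiv window 2) 1).foldl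
      (fun b l => if PySem.List.pyGetD arr l 0 ≤ PySem.List.pyGetD arr (l + 1) 0 then false else b) true
    let m2 := (PySem.List.pyRange (i + 1 + PySem.Int.floordiv window 2) (i + window) 1).foldl
      (fun b r => if PySem.List.pyGetD arr r 0 ≤ PySem.List.pyGetD arr (r - 1) 0 then false else b) m1
    if m2 then minimas ++ [i] else minimas) []

-- ===== PORT B =====
-- run lengths of consecutive steps satisfying cmp, computed right-to-left (Source B's reversed loop)
def pvRuns (cmp : Int → Int → Bool) : List Int → List Nat
  | [] => [0]
  | [_] => [0]
  | a :: b :: rest =>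
    let t := pvRuns cmp (b :: rest)
    (if cmp a b then t.headD 0 + 1 else 0) :: t

def local_minimas_py_alt (arr : List Int) (window : Int) : List Int :=
  let h := PySem.Int.floordiv window 2
  let k := window - 1 - h
  let down := pvRuns (fun x y => y < x) arr
  let up := pvRuns (fun x y => x < y) arr
  (PySem.List.pyRange 0 ((arr.length : Int) - window) 1).foldl (fun res i =>
    if (decide (h ≤ 0) || decide (h ≤ (down.getD i.toNat 0 : Int))) &&
       (decide (k ≤ 0) || decide (k ≤ (up.getD ((i + h).toNat) 0 : Int)))
    then res ++ [i] else res) []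

-- ===== PRECONDITION & SPEC =====
def Spec_local_minimas_py (arr : List Int) (window : Int) (out : List Int) : Prop := out = local_minimas_py_alt arr window
instance (arr : List Int) (window : Int) (out : List Int) : Decidable (Spec_local_minimas_py arr window out) := by unfold Spec_local_minimas_py; infer_instance

-- ===== CLAIM (what is proved, stated in full; the proofs are below) =====
def Claim_equal_local_minimas_py : Prop := ∀ (arr : List Int) (window : Int), Dom_local_minimas_py arr window → Spec_local_minimas_py arr window (local_minimas_py arr window)

-- ===== LEMMAS AND PROOFS =====

-- A's inner loops: folding "set to false on violation" computes init && all-hold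
theorem pvFoldFalse (C : Int → Prop) [DecidablePred C] (xs : List Int) (b0 : Bool) :
    xs.foldl (fun b l => if C l then false else b) b0 = (b0 && xs.all (fun l => !decide (C l))) := by
  induction xs generalizing b0 with
  | nil => simp
  | cons x xs ih =>
    simp only [List.foldl_cons, List.all_cons, ih]
    by_cases hC : C x <;> simp [hC]

-- head of pvRuns equals its getD 0
theorem pvRuns_headD (cmp : Int → Int → Bool) (l : List Int) :
    (pvRuns cmp l).headD 0 = (pvRuns cmp l).getD 0 0 := by
  cases l with
  | nil => rfl
  | cons a t => cases t <;> simp [pvRuns]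

-- the 'spec' form of a run length from the front
def pvRunHead (cmp : Int → Int → Bool) : List Int → Nat
  | [] => 0
  | [_] => 0
  | a :: b :: rest => if cmp a b then pvRunHead cmp (b :: rest) + 1 else 0

theorem pvRuns_getD (cmp : Int → Int → Bool) (l : List Int) (j : Nat) :
    (pvRuns cmp l).getD j 0 = pvRunHead cmp (l.drop j) := by
  induction l generalizing j with
  | nil => cases j <;> simp [pvRuns, pvRunHead]
  | cons a t ih =>
    cases t with
    | nil => cases j with
      | zero => simp [pvRuns, pvRunHead]
      | succ j => cases j <;> simp [pvRuns, pvRunHead]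
    | cons b r =>
      cases j with
      | zero =>
        simp only [pvRuns, List.drop_zero, List.getD_cons_zero]
        rw [pvRuns_headD, ih 0]
        simp [pvRunHead]
      | succ j => simpa [pvRuns] using ih j

theorem pvRunHead_ge (cmp : Int → Int → Bool) (m : Nat) (l : List Int) (hm : m < l.length) :
    m ≤ pvRunHead cmp l ↔ ∀ t, t < m → cmp (l.getD t 0) (l.getD (t + 1) 0) = true := by
  induction m generalizing l with
  | zero => simp
  | succ m ih =>
    match l, hm with
    | a :: b :: r, hm =>
      have hm' : m < (b :: r).length := by simpa using Nat.lt_of_succ_lt_succ hm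
      constructor
      · intro hge t ht
        have hcab : cmp a b = true := by
          by_contra hc
          simp [pvRunHead, hc] at hge
        have hrest : m ≤ pvRunHead cmp (b :: r) := by
          simp [pvRunHead, hcab] at hge; omega
        cases t with
        | zero => simpa using hcab
        | succ t =>
          have := (ih (b :: r) hm').1 hrest t (Nat.lt_of_succ_lt_succ ht)
          simpa using this
      · intro hall
        have hcab : cmp a b = true := by simpa using hall 0 (Nat.succ_pos m)
        have hrest : m ≤ pvRunHead cmp (b :: r) := by
          refine (ih (b :: r) hm').2 ?_
          intro t ht
          simpa using hall (t + 1) (Nat.succ_lt_succ ht)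
        simp [pvRunHead, hcab]; omega

-- run-length test at Nat position j ⟺ all m steps from j hold, given they exist
theorem pvRuns_test (cmp : Int → Int → Bool) (arr : List Int) (j m : Nat)
    (hjm : j + m < arr.length) :
    m ≤ (pvRuns cmp arr).getD j 0 ↔
      ∀ t, t < m → cmp (arr.getD (j + t) 0) (arr.getD (j + t + 1) 0) = true := by
  rw [pvRuns_getD]
  have hlen : m < (arr.drop j).length := by simp [List.length_drop]; omega
  rw [pvRunHead_ge cmp m _ hlen]
  constructor <;> intro h t ht <;> have := h t ht <;>
    simpa [List.getD, List.getElem?_drop, Nat.add_assoc] using this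

-- Int form: the run-length bracket B tests ⟺ the universally quantified step condition
theorem pvAll_runs (cmp : Int → Int → Bool) (arr : List Int) (s m : Int)
    (hs : 0 ≤ s) (hbound : s + m < (arr.length : Int)) :
    (m ≤ ((pvRuns cmp arr).getD s.toNat 0 : Int)) ↔
    (∀ l : Int, s ≤ l → l < s + m →
      cmp (PySem.List.pyGetD arr l 0) (PySem.List.pyGetD arr (l + 1) 0) = true) := by
  by_cases hm : m ≤ 0
  · constructor
    · intro _ l h1 h2
      omega
    · intro _
      have := Int.natCast_nonneg ((pvRuns cmp arr).getD s.toNat 0)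
      omega
  have h1 := pvRuns_test cmp arr s.toNat m.toNat (by omega)
  constructor
  · intro hge l hl1 hl2
    have hge' : m.toNat ≤ (pvRuns cmp arr).getD s.toNat 0 := by omega
    have ht : (l - s).toNat < m.toNat := by omega
    have := h1.1 hge' (l - s).toNat ht
    rw [PySem.List.pyGetD_of_nonneg arr 0 (by omega),
        PySem.List.pyGetD_of_nonneg arr 0 (by omega)]
    have e1 : l.toNat = s.toNat + (l - s).toNat := by omega
    have e2 : (l + 1).toNat = s.toNat + (l - s).toNat + 1 := by omega
    rw [e1, e2]; exact this
  · intro hall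
    have : m.toNat ≤ (pvRuns cmp arr).getD s.toNat 0 := by
      refine h1.2 ?_
      intro t ht
      have := hall (s + t) (by omega) (by omega)
      rw [PySem.List.pyGetD_of_nonneg arr 0 (by omega),
          PySem.List.pyGetD_of_nonneg arr 0 (by omega)] at this
      have e1 : (s + (t : Int)).toNat = s.toNat + t := by omega
      have e2 : (s + (t : Int) + 1).toNat = s.toNat + t + 1 := by omega
      rw [e1, e2] at this; exact this
    omega

theorem local_minimas_eq (arr : List Int) (window : Int) :
    local_minimas_py arr window = local_minimas_py_alt arr window := by
  unfold local_minimas_py local_minimas_py_alt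
  rw [PySem.List.foldl_append_if (f := fun (i : Int) => i),
      PySem.List.foldl_append_if (f := fun (i : Int) => i)]
  simp only [List.nil_append]
  congr 1
  apply List.filter_congr
  intro i hi
  rw [PySem.List.mem_pyRange_one] at hi
  obtain ⟨hi0, hin⟩ := hi
  set h : Int := PySem.Int.floordiv window 2 with hh
  have hdiv : h = window / 2 := PySem.Int.floordiv_eq_ediv_of_pos (by norm_num)
  rw [pvFoldFalse, pvFoldFalse]
  simp only [Bool.true_and]
  have hA1 : ((PySem.List.pyRange i (i + h)).all
        (fun l => !decide (PySem.List.pyGetD arr l 0 ≤ PySem.List.pyGetD arr (l + 1) 0)))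
      = (decide (h ≤ 0) ||
         decide (h ≤ ((pvRuns (fun x y => decide (y < x)) arr).getD i.toNat 0 : Int))) := by
    by_cases hp : h ≤ 0
    · rw [PySem.List.pyRange_one_eq_nil (by omega)]
      simp [hp]
    · have hiff := pvAll_runs (fun x y => decide (y < x)) arr i h hi0 (by omega)
      apply Bool.coe_iff_coe.mp
      simp only [List.all_eq_true, PySem.List.mem_pyRange_one, Bool.or_eq_true,
        decide_eq_true_eq, Bool.not_eq_eq_eq_not, Bool.not_true, decide_eq_false_iff_not,
        not_le] at *
      constructor
      · intro hall
        exact Or.inr (hiff.2 (fun l h1 h2 => hall l ⟨h1, h2⟩))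
      · rintro (habs | hge) l ⟨h1, h2⟩
        · omega
        · exact hiff.1 hge l h1 h2
  have hA2 : ((PySem.List.pyRange (i + 1 + h) (i + window)).all
        (fun r => !decide (PySem.List.pyGetD arr r 0 ≤ PySem.List.pyGetD arr (r - 1) 0)))
      = (decide (window - 1 - h ≤ 0) ||
         decide (window - 1 - h ≤
           ((pvRuns (fun x y => decide (x < y)) arr).getD (i + h).toNat 0 : Int))) := by
    by_cases hk0 : window - 1 - h ≤ 0
    · rw [PySem.List.pyRange_one_eq_nil (by omega)]
      simp [hk0]
    · have hiff := pvAll_runs (fun x y => decide (x < y)) arr (i + h) (window - 1 - h)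
        (by omega) (by omega)
      apply Bool.coe_iff_coe.mp
      simp only [List.all_eq_true, PySem.List.mem_pyRange_one, Bool.or_eq_true,
        decide_eq_true_eq, Bool.not_eq_eq_eq_not, Bool.not_true, decide_eq_false_iff_not,
        not_le] at *
      constructor
      · intro hall
        refine Or.inr (hiff.2 (fun l h1 h2 => ?_))
        have := hall (l + 1) ⟨by omega, by omega⟩
        simpa using this
      · rintro (habs | hge) r ⟨h1, h2⟩
        · omega
        · have := hiff.1 hge (r - 1) (by omega) (by omega)
          simpa using this
  rw [hA1, hA2]

-- ===== VERDICT (by name: the statement is the Claim_ definition above) =====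
theorem local_minimas_py_spec : Claim_equal_local_minimas_py := by
  intro arr window _
  unfold Spec_local_minimas_py
  exact local_minimas_eq arr window
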